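-- pv_equiv track=rewrite | github.com/JasonLovesDoggo/dyelog | dyelog/utils/find_pattern.py | find_pattern
-- ===== SOURCE A (Python) =====
-- def find_pattern(word: str) -> str:
--     """
--     Find the pattern that matches the given word.
--
--     Args:
--         word (str): The word to find a pattern for
--
--     Returns:
--         str: Space-separated pattern (e.g., "A-F G-M N-T U-Z U-Z")
--
--     Example:
--         >>> find_pattern("PARIS")
--         "N-T A-F N-T G-M N-T"
--     """
--     sets = {
--         "A-F": set("ABCDEF"),
--         "G-M": set("GHIJKLM"),
--         "N-T": set("NOPQRST"),
--         "U-Z": set("UVWXYZ"),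
--     }
--
--     if not word:
--         return ""
--
--     pattern_parts = []
--     word = word.upper()
--
--     for letter in word:
--         found = False
--         for set_name, char_set in sets.items():
--             if letter in char_set:
--                 pattern_parts.append(set_name)
--                 found = True
--                 break
--         if not found:
--             raise ValueError(f"Letter '{letter}' not found in any character set")
--
--     return " ".join(pattern_parts)
-- ===== SOURCE B (Python) =====
-- def find_pattern(word: str) -> str:
--     """Classify each letter by ordinal arithmetic against cumulative thresholds
--     instead of scanning a dict of character sets."""
--     if not word:
--         return ""
--     labels = []
--     for c in word.upper():
--         idx = ord(c) - ord("A")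
--         if not (0 <= idx < 26):
--             raise ValueError(f"Letter '{c}' not found in any character set")
--         labels.append("A-F" if idx < 6 else "G-M" if idx < 13 else "N-T" if idx < 20 else "U-Z")
--     return " ".join(labels)
-- ===== Notes on version B (the rewrite author's own statement) =====
-- stated objective: simpler
-- what changed: Replaces the dict of four character sets and the inner scan-with-break by ordinal arithmetic: each uppercased letter's alphabet index selects the label via three numeric threshold comparisons.
import Mathlib
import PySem

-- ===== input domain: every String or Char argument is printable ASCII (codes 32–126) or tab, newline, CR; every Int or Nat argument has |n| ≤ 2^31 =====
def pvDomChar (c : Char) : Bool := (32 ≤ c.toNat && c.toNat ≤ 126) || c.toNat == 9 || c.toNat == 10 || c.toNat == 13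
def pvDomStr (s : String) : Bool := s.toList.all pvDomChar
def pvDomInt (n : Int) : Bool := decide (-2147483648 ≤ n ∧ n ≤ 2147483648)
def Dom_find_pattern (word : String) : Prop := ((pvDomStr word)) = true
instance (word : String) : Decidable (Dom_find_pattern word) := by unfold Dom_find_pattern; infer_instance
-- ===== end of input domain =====

-- Header: B classifies each uppercased letter by ordinal arithmetic (thresholds 6/13/20)
-- instead of A's scan over a dict of four character sets; same result, simpler code.

-- ===== PORT A =====
-- the dict 'sets' (only membership is used)
def pvSetsA : List (String × PySem.Set Char) :=
  [("A-F", PySem.Set.ofList "ABCDEF".toList),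
   ("G-M", PySem.Set.ofList "GHIJKLM".toList),
   ("N-T", PySem.Set.ofList "NOPQRST".toList),
   ("U-Z", PySem.Set.ofList "UVWXYZ".toList)]

-- inner 'for set_name, char_set in sets.items(): … break' with the 'found' flag:
-- first set containing the letter, none = not found
def pvScanSetsA : List (String × PySem.Set Char) → Char → Option String
  | [], _ => none
  | (name, s) :: rest, c =>
      if PySem.Set.contains s c then some name else pvScanSetsA rest c

-- outer 'for letter in word': none = the ValueError path
def pvLoopA : List Char → Option (List String)
  | [] => some []
  | c :: rest =>
      match pvScanSetsA pvSetsA c with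
      | none => none
      | some name => (pvLoopA rest).map (name :: ·)

def find_pattern (word : String) : String :=
  if word = "" then ""
  else
    match pvLoopA (PySem.Str.upper word).toList with
    | some parts => PySem.Str.join " " parts
    | none => ""   -- ValueError in Python; excluded by Pre_find_pattern

-- ===== PORT B =====
def pvLabelB (idx : Int) : String :=
  if idx < 6 then "A-F" else if idx < 13 then "G-M" else if idx < 20 then "N-T" else "U-Z"

-- 'for c in word.upper()': none = the ValueError path
def pvLoopB : List Char → Option (List String)
  | [] => some []
  | c :: rest =>
      let idx : Int := (c.toNat : Int) - 65
      if 0 ≤ idx ∧ idx < 26 then (pvLoopB rest).map (pvLabelB idx :: ·) else none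

def find_pattern_alt (word : String) : String :=
  if word = "" then ""
  else
    match pvLoopB (PySem.Str.upper word).toList with
    | some parts => PySem.Str.join " " parts
    | none => ""   -- ValueError in Python; excluded by Pre_find_pattern

-- ===== PRECONDITION & SPEC =====
-- Pre_ excludes exactly the inputs on which A raises ValueError: any character
-- that is not an ASCII letter (both programs raise the identical error there).
def Pre_find_pattern (word : String) : Prop := word.toList.all Char.isAlpha = true
instance (word : String) : Decidable (Pre_find_pattern word) := by unfold Pre_find_pattern; infer_instance
def pvWitness_find_pattern : String := "Paris"

def Spec_find_pattern (word : String) (out : String) : Prop := out = find_pattern_alt word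
instance (word : String) (out : String) : Decidable (Spec_find_pattern word out) := by unfold Spec_find_pattern; infer_instance

-- ===== CLAIM (what is proved, stated in full; the proofs are below) =====
def Claim_equal_find_pattern : Prop := ∀ (word : String), Dom_find_pattern word → Pre_find_pattern word → Spec_find_pattern word (find_pattern word)

-- ===== LEMMAS AND PROOFS =====

-- in the letter range both steps produce the same label
lemma pvScan_of_range (n : Nat) (h : n < 26) :
    pvScanSetsA pvSetsA (Char.ofNat (65 + n)) = some (pvLabelB (n : Int)) := by
  revert n; decide

-- outside the letter range A's scan finds nothing
lemma pvScan_of_out (c : Char) (h : ¬ (65 ≤ c.toNat ∧ c.toNat ≤ 90)) :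
    pvScanSetsA pvSetsA c = none := by
  have hc : ∀ (s : String), (s.toList.all (fun d => 65 ≤ d.toNat && d.toNat ≤ 90)) = true →
      PySem.Set.contains (PySem.Set.ofList s.toList) c = false := by
    intro s hs
    by_contra hcon
    have ht : PySem.Set.contains (PySem.Set.ofList s.toList) c = true := by
      revert hcon; cases PySem.Set.contains (PySem.Set.ofList s.toList) c <;> simp
    have hm : c ∈ s.toList :=
      (PySem.Set.mem_ofList s.toList c).mp ((PySem.Set.contains_iff (PySem.Set.ofList s.toList) c).mp ht)
    have hb := List.all_eq_true.mp hs c hm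
    simp only [Bool.and_eq_true, decide_eq_true_eq] at hb
    exact h hb
  simp only [pvScanSetsA, pvSetsA]
  rw [hc "ABCDEF" (by decide), hc "GHIJKLM" (by decide), hc "NOPQRST" (by decide),
      hc "UVWXYZ" (by decide)]
  simp

-- the two per-letter steps agree on EVERY character
lemma pvStep_eq (c : Char) :
    pvScanSetsA pvSetsA c =
      (if 0 ≤ (c.toNat : Int) - 65 ∧ (c.toNat : Int) - 65 < 26
       then some (pvLabelB ((c.toNat : Int) - 65)) else none) := by
  by_cases h : 65 ≤ c.toNat ∧ c.toNat ≤ 90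
  · have hn : c.toNat - 65 < 26 := by omega
    have hc : Char.ofNat (65 + (c.toNat - 65)) = c := by
      have : 65 + (c.toNat - 65) = c.toNat := by omega
      rw [this, Char.ofNat_toNat]
    have := pvScan_of_range (c.toNat - 65) hn
    rw [hc] at this
    rw [this]
    have hcast : ((c.toNat - 65 : Nat) : Int) = (c.toNat : Int) - 65 := by omega
    rw [hcast] at this ⊢
    rw [if_pos (by omega)]
  · rw [pvScan_of_out c h, if_neg (by omega)]

-- hence the two loops agree on every character list
lemma pvLoop_eq (cs : List Char) : pvLoopA cs = pvLoopB cs := by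
  induction cs with
  | nil => rfl
  | cons c rest ih =>
      by_cases h : 0 ≤ ((c.toNat : Int)) - 65 ∧ ((c.toNat : Int)) - 65 < 26
      · simp only [pvLoopA, pvLoopB, pvStep_eq c, ih, if_pos h]
      · simp only [pvLoopA, pvLoopB, pvStep_eq c, if_neg h]

-- ===== VERDICT (by name: the statement is the Claim_ definition above) =====
theorem find_pattern_spec : Claim_equal_find_pattern := by
  intro word _ _
  unfold Spec_find_pattern find_pattern find_pattern_alt
  rw [pvLoop_eq]
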